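-- pv_equiv track=rewrite | github.com/6amape9I/TestTask | graph_main.py | cycles_unique
-- ===== SOURCE A (Python) =====
-- def cycles_unique(cycles):
--     new_cycles = []
--     for cycle in cycles:
--         flag = True
--         for i in range(len(cycle)):
--             temp_cycle = cycle[i:] + cycle[:i]
--             if temp_cycle in new_cycles:
--                 flag = False
--                 break
--             if temp_cycle[::-1] in new_cycles:
--                 flag = False
--                 break
--         if flag:
--             new_cycles.append(cycle)
--     return new_cycles
-- ===== SOURCE B (Python) =====
-- def _same_cycle(c, d):
--     return any(c[i:] + c[:i] == d or (c[i:] + c[:i])[::-1] == d for i in range(len(c)))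
--
-- def cycles_unique(cycles):
--     buckets = {}
--     out = []
--     for cycle in cycles:
--         key = tuple(sorted(cycle))
--         bucket = buckets.get(key, [])
--         if not any(_same_cycle(cycle, d) for d in bucket):
--             out.append(cycle)
--             buckets[key] = bucket + [cycle]
--     return out
-- ===== Notes on version B (the rewrite author's own statement) =====
-- stated objective: faster
-- what changed: B replaces A's scan of the whole accepted list for every rotation with a dict that buckets accepted cycles under a rotation/reflection-invariant key (the sorted values), so each cycle is compared only against its usually-empty bucket.
import Mathlib
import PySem

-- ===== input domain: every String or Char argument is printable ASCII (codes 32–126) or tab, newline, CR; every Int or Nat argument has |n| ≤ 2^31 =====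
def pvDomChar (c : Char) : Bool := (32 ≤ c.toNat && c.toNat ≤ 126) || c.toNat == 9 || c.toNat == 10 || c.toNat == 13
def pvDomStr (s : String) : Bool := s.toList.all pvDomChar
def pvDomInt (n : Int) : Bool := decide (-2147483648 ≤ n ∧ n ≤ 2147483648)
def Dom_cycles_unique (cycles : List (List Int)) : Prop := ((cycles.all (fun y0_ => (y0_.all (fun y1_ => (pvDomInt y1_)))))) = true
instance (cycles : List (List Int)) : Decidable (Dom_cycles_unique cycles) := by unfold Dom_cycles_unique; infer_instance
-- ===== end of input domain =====

-- B buckets accepted cycles in a dict keyed by their sorted values (a rotation/reflection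
-- invariant) and tests rotations only against the matching bucket, instead of A's scan of
-- the whole accepted list for every rotation; return value only, no mutation.

-- ===== PORT A =====
-- inner 'for i in range(len(cycle))' loop with its two breaks; returns the final 'flag'
-- (temp_cycle[::-1] is List.reverse, per PySem.List.slice?_none_none_neg_one)
def aFlag (cycle : List Int) (newCycles : List (List Int)) : List Nat → Bool
  | [] => true
  | i :: rest =>
    let temp := PySem.List.slice cycle (some (i : Int)) none ++
                PySem.List.slice cycle none (some (i : Int))
    if newCycles.contains temp then false
    else if newCycles.contains temp.reverse then false
    else aFlag cycle newCycles rest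

def cycles_unique (cycles : List (List Int)) : List (List Int) :=
  cycles.foldl (fun newCycles cycle =>
    if aFlag cycle newCycles (List.range cycle.length) then newCycles ++ [cycle]
    else newCycles) []

-- ===== PORT B =====
-- _same_cycle(c, d): some rotation of c, or its reversal, equals d
def bSame (c d : List Int) : Bool :=
  (List.range c.length).any (fun (i : Nat) =>
    let t := PySem.List.slice c (some (i : Int)) none ++
             PySem.List.slice c none (some (i : Int))
    t == d || t.reverse == d)

-- key = tuple(sorted(cycle))
def bKey (c : List Int) : List Int := PySem.List.sorted c (fun x => x) false

def cycles_unique_alt (cycles : List (List Int)) : List (List Int) :=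
  (cycles.foldl (fun (st : PySem.Dict (List Int) (List (List Int)) × List (List Int)) cycle =>
      let key := bKey cycle
      let bucket := st.1.getD key []
      if bucket.any (fun d => bSame cycle d) then st
      else (st.1.insert key (bucket ++ [cycle]), st.2 ++ [cycle]))
    ((PySem.Dict.empty : PySem.Dict (List Int) (List (List Int))), ([] : List (List Int)))).2

-- ===== PRECONDITION & SPEC =====
def Spec_cycles_unique (cycles : List (List Int)) (out : List (List Int)) : Prop := out = cycles_unique_alt cycles
instance (cycles : List (List Int)) (out : List (List Int)) : Decidable (Spec_cycles_unique cycles out) := by unfold Spec_cycles_unique; infer_instance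

-- ===== CLAIM (what is proved, stated in full; the proofs are below) =====
def Claim_equal_cycles_unique : Prop := ∀ (cycles : List (List Int)), Dom_cycles_unique cycles → Spec_cycles_unique cycles (cycles_unique cycles)

-- ===== LEMMAS AND PROOFS =====

-- d is a rotation of c or the reversal of one
def OrbMem (c d : List Int) : Prop :=
  ∃ i < c.length, (c.drop i ++ c.take i = d ∨ (c.drop i ++ c.take i).reverse = d)

theorem slice_rot (c : List Int) (i : Nat) :
    PySem.List.slice c (some (i : Int)) none ++ PySem.List.slice c none (some (i : Int))
      = c.drop i ++ c.take i := by
  rw [PySem.List.slice_from_natCast, PySem.List.slice_to_natCast]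

theorem bSame_iff (c d : List Int) : bSame c d = true ↔ OrbMem c d := by
  unfold bSame OrbMem
  simp only [List.any_eq_true, List.mem_range, slice_rot, Bool.or_eq_true, beq_iff_eq]

theorem aFlag_iff (c : List Int) (new : List (List Int)) :
    aFlag c new (List.range c.length) = true ↔ ∀ d ∈ new, ¬ OrbMem c d := by
  have key : ∀ idxs : List Nat, aFlag c new idxs = true ↔
      ∀ i ∈ idxs, (c.drop i ++ c.take i) ∉ new ∧ (c.drop i ++ c.take i).reverse ∉ new := by
    intro idxs
    induction idxs with
    | nil => simp [aFlag]
    | cons i rest ih =>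
      simp only [aFlag, slice_rot, List.mem_cons]
      split_ifs with h1 h2
      · simp_all
      · simp_all
      · simp only [List.contains_eq_mem, decide_eq_true_eq] at h1 h2
        constructor
        · intro h j hj
          rcases hj with rfl | hj
          · exact ⟨h1, h2⟩
          · exact (ih.mp h) j hj
        · intro h; exact ih.mpr (fun j hj => h j (Or.inr hj))
  rw [key (List.range c.length)]
  unfold OrbMem
  constructor
  · rintro h d hd ⟨i, hi, hrot | hrot⟩
    · exact (h i (List.mem_range.mpr hi)).1 (hrot ▸ hd)
    · exact (h i (List.mem_range.mpr hi)).2 (hrot ▸ hd)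
  · intro h i hi
    exact ⟨fun hmem => h _ hmem ⟨i, List.mem_range.mp hi, Or.inl rfl⟩,
           fun hmem => h _ hmem ⟨i, List.mem_range.mp hi, Or.inr rfl⟩⟩

theorem perm_of_orbMem {c d : List Int} (h : OrbMem c d) : c.Perm d := by
  rcases h with ⟨i, hi, hrot | hrot⟩
  · rw [← hrot, ← List.rotate_eq_drop_append_take hi.le]
    exact (List.rotate_perm c i).symm
  · rw [← hrot, ← List.rotate_eq_drop_append_take hi.le]
    exact ((List.rotate_perm c i).symm).trans (List.reverse_perm _).symm

theorem key_eq_of_orbMem {c d : List Int} (h : OrbMem c d) : bKey d = bKey c := by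
  unfold bKey
  exact PySem.List.sorted_eq_sorted_of_perm d c (fun x => x) (fun _ _ hxy => hxy)
    (perm_of_orbMem h).symm

-- loop invariant: the buckets dict holds exactly the accepted cycles, under their key
def BInv (b : PySem.Dict (List Int) (List (List Int))) (out : List (List Int)) : Prop :=
  (∀ k d, d ∈ b.getD k [] → d ∈ out ∧ bKey d = k) ∧
  (∀ d ∈ out, d ∈ b.getD (bKey d) [])

theorem main_fold (cycles : List (List Int)) :
    ∀ (b : PySem.Dict (List Int) (List (List Int))) (new : List (List Int)), BInv b new →
    (cycles.foldl (fun (st : PySem.Dict (List Int) (List (List Int)) × List (List Int)) cycle =>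
        let key := bKey cycle
        let bucket := st.1.getD key []
        if bucket.any (fun d => bSame cycle d) then st
        else (st.1.insert key (bucket ++ [cycle]), st.2 ++ [cycle])) (b, new)).2
      = cycles.foldl (fun newCycles cycle =>
          if aFlag cycle newCycles (List.range cycle.length) then newCycles ++ [cycle]
          else newCycles) new := by
  induction cycles with
  | nil => intro b new _; rfl
  | cons c rest ih =>
    intro b new hinv
    simp only [List.foldl_cons]
    have hcond : (b.getD (bKey c) []).any (fun d => bSame c d) = !aFlag c new (List.range c.length) := by
      rcases h : aFlag c new (List.range c.length) with _ | _
      · have h' : ¬ ∀ d ∈ new, ¬ OrbMem c d := fun hh => by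
          rw [(aFlag_iff c new).mpr hh] at h; cases h
        push Not at h'
        rcases h' with ⟨d, hd, hdo⟩
        have hdb : d ∈ b.getD (bKey c) [] := by
          rw [← key_eq_of_orbMem hdo]; exact hinv.2 d hd
        simp only [Bool.not_false, List.any_eq_true]
        exact ⟨d, hdb, (bSame_iff c d).mpr hdo⟩
      · rw [aFlag_iff] at h
        simp only [Bool.not_true, List.any_eq_false]
        intro d hdb
        rcases hinv.1 _ _ hdb with ⟨hd, _⟩
        simpa [bSame_iff] using h d hd
    by_cases h : aFlag c new (List.range c.length) = true
    · rw [h] at hcond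
      rw [if_pos h, hcond]
      simp only [Bool.not_true, if_neg (Bool.false_ne_true)]
      refine ih _ _ ⟨?_, ?_⟩
      · intro k d hd
        rw [PySem.Dict.getD_insert] at hd
        by_cases hk : k = bKey c
        · rw [if_pos hk] at hd
          rcases List.mem_append.mp hd with hd | hd
          · rcases hinv.1 _ _ (hk ▸ hd) with ⟨h1, h2⟩
            exact ⟨List.mem_append.mpr (Or.inl h1), h2⟩
          · rcases List.mem_singleton.mp hd with rfl
            exact ⟨List.mem_append.mpr (Or.inr (List.mem_singleton.mpr rfl)), hk.symm⟩
        · rw [if_neg hk] at hd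
          rcases hinv.1 _ _ hd with ⟨h1, h2⟩
          exact ⟨List.mem_append.mpr (Or.inl h1), h2⟩
      · intro d hd
        rw [PySem.Dict.getD_insert]
        rcases List.mem_append.mp hd with hd | hd
        · by_cases hk : bKey d = bKey c
          · rw [if_pos hk, ← hk]
            exact List.mem_append.mpr (Or.inl (hinv.2 d hd))
          · rw [if_neg hk]; exact hinv.2 d hd
        · rcases List.mem_singleton.mp hd with rfl
          rw [if_pos rfl]
          exact List.mem_append.mpr (Or.inr (List.mem_singleton.mpr rfl))
    · rw [if_neg h]
      rw [Bool.eq_false_iff.mpr h] at hcond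
      rw [hcond]
      simp only [Bool.not_false]
      exact ih b new hinv

-- ===== VERDICT (by name: the statement is the Claim_ definition above) =====
theorem cycles_unique_spec : Claim_equal_cycles_unique := by
  intro cycles _
  unfold Spec_cycles_unique cycles_unique cycles_unique_alt
  exact (main_fold cycles PySem.Dict.empty []
    ⟨by intro k d hd; simp [PySem.Dict.getD_empty] at hd, by intro d hd; cases hd⟩).symm
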